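-- pv_equiv track=rewrite | github.com/Nickeilf/InformalMT | runs/charTransformer/char_split.py | segment_char
-- ===== SOURCE A (Python) =====
-- def segment_char(sent):
--     temp = ""
--     beginning_char = True
--     for char in sent:
--         if char != ' ':
--             if beginning_char:
--                 temp+=char+" "
--                 beginning_char=False
--             else:
--                 if char == '\n':
--                     temp += char
--                 else:
--                     temp+="_"+char+" "
--         else:
--             beginning_char=True
--     temp = temp.strip()
--     return temp
-- ===== SOURCE B (Python) =====
-- def segment_char(sent):
--     pieces = []
--     for word in sent.split(' '):
--         for i, c in enumerate(word):
--             if i == 0: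
--                 pieces.append(c + " ")
--             elif c == '\n':
--                 pieces.append(c)
--             else:
--                 pieces.append("_" + c + " ")
--     return ''.join(pieces).strip()
-- ===== Notes on version B (the rewrite author's own statement) =====
-- stated objective: idiomatic
-- what changed: Replaces A's single flat pass with a mutable beginning_char flag by a words-first nested traversal: split the sentence at single spaces, render each word by its enumerate index (first char vs rest), join the pieces and strip.
import Mathlib
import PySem

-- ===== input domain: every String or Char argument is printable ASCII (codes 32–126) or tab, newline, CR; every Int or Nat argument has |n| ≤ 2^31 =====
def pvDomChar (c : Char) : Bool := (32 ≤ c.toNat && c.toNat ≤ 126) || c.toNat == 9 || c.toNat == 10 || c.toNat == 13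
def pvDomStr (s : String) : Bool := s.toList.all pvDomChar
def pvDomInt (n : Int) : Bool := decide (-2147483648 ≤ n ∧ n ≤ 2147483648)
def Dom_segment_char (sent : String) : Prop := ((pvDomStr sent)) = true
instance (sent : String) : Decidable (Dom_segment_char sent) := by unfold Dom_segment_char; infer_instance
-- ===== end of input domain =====

-- B replaces A's flat pass with a stateful beginning-of-word flag by a words-first
-- traversal: split on ' ', render each word by enumerate index (idiomatic; same cost).

-- ===== PORT A =====
-- one step of A's loop over the characters, state = (temp, beginning_char)
def segAstep (st : List Char × Bool) (c : Char) : List Char × Bool :=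
  if c ≠ ' ' then
    if st.2 then (st.1 ++ [c, ' '], false)
    else if c = '\n' then (st.1 ++ [c], st.2)
    else (st.1 ++ ['_', c, ' '], st.2)
  else (st.1, true)

def segment_char (sent : String) : String :=
  String.ofList (PySem.Chars.strip (sent.toList.foldl segAstep ([], true)).1)

-- ===== PORT B =====
-- B's inner loop: for i, c in enumerate(word), append the piece for (i, c)
def segBword (ps : List (List Char)) (w : List Char) : List (List Char) :=
  (PySem.List.enumerate w 0).foldl
    (fun ps ic =>
      if ic.1 = 0 then ps ++ [[ic.2, ' ']]
      else if ic.2 = '\n' then ps ++ [[ic.2]]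
      else ps ++ [['_', ic.2, ' ']]) ps

def segment_char_alt (sent : String) : String :=
  String.ofList (PySem.Chars.strip (PySem.Chars.join [] ((sent.toList.splitOn ' ').foldl segBword [])))

-- ===== PRECONDITION & SPEC =====
def Spec_segment_char (sent : String) (out : String) : Prop := out = segment_char_alt sent
instance (sent : String) (out : String) : Decidable (Spec_segment_char sent out) := by unfold Spec_segment_char; infer_instance

-- ===== CLAIM (what is proved, stated in full; the proofs are below) =====
def Claim_equal_segment_char : Prop := ∀ (sent : String), Dom_segment_char sent → Spec_segment_char sent (segment_char sent)

-- ===== LEMMAS AND PROOFS =====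

-- the text emitted for a non-first character of a word
def segMid (c : Char) : List Char := if c = '\n' then [c] else ['_', c, ' ']

-- the pieces B produces for one word
def segPieces : List Char → List (List Char)
  | [] => []
  | c :: w => [c, ' '] :: w.map segMid

lemma splitOnP_space_ne_nil (cs : List Char) : List.splitOnP (· == ' ') cs ≠ [] := by
  induction cs with
  | nil => simp [List.splitOnP, List.splitOnP.go]
  | cons c cs ih =>
    rw [List.splitOnP_cons]
    split
    · simp
    · cases h : List.splitOnP (· == ' ') cs with
      | nil => exact absurd h ih
      | cons w ws => simp

-- B's inner fold past the first character appends exactly the mid pieces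
lemma segBword_tail (w : List Char) (s : Int) (hs : 1 ≤ s) (ps : List (List Char)) :
    (PySem.List.enumerate w s).foldl
      (fun ps ic =>
        if ic.1 = 0 then ps ++ [[ic.2, ' ']]
        else if ic.2 = '\n' then ps ++ [[ic.2]]
        else ps ++ [['_', ic.2, ' ']]) ps
      = ps ++ w.map segMid := by
  induction w generalizing s ps with
  | nil => simp [PySem.List.enumerate_nil]
  | cons c w ih =>
    rw [PySem.List.enumerate_cons]
    have hne : ¬ (s = 0) := by omega
    simp only [List.foldl_cons, hne, if_false]
    rw [ih (s + 1) (by omega)]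
    by_cases h : c = '\n' <;> simp [h, segMid]

lemma segBword_eq (ps : List (List Char)) (w : List Char) :
    segBword ps w = ps ++ segPieces w := by
  cases w with
  | nil => simp [segBword, segPieces, PySem.List.enumerate_nil]
  | cons c w =>
    unfold segBword
    rw [PySem.List.enumerate_cons]
    simp only [List.foldl_cons]
    norm_num
    rw [segBword_tail w 1 (le_refl 1)]
    simp [segPieces]

lemma segB_outer (ws : List (List Char)) (ps : List (List Char)) :
    ws.foldl segBword ps = ps ++ (ws.map segPieces).flatten := by
  induction ws generalizing ps with
  | nil => simp
  | cons w ws ih => simp [List.foldl_cons, segBword_eq, ih]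

lemma flatten_intersperse_nil (ps : List (List Char)) :
    (List.intersperse ([] : List Char) ps).flatten = ps.flatten := by
  induction ps with
  | nil => rfl
  | cons h t ih => cases t <;> simp_all [List.intersperse]

-- the flattened text B produces for a whole character list (words-first form)
def segFlatT (cs : List Char) : List Char :=
  ((List.splitOnP (· == ' ') cs).map segPieces).flatten.flatten

-- the same when the pass is mid-word (first word rendered without its leading piece)
def segFlatF (cs : List Char) : List Char :=
  match List.splitOnP (· == ' ') cs with
  | [] => []
  | w :: ws => (w.map segMid).flatten ++ ((ws.map segPieces).flatten).flatten

-- A's loop, from either flag state, appends exactly the words-first rendering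
lemma segA_char (cs : List Char) : ∀ temp : List Char,
    (cs.foldl segAstep (temp, true)).1 = temp ++ segFlatT cs ∧
    (cs.foldl segAstep (temp, false)).1 = temp ++ segFlatF cs := by
  induction cs with
  | nil =>
    intro temp
    simp [segFlatT, segFlatF, List.splitOnP, List.splitOnP.go, segPieces]
  | cons c cs ih =>
    intro temp
    by_cases hsp : c = ' '
    · subst hsp
      have hstep : ∀ b, segAstep (temp, b) ' ' = (temp, true) := by
        intro b; simp [segAstep]
      have hT : segFlatT (' ' :: cs) = segFlatT cs := by
        simp [segFlatT, List.splitOnP_cons, segPieces]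
      have hF : segFlatF (' ' :: cs) = segFlatT cs := by
        simp only [segFlatF, segFlatT, List.splitOnP_cons]
        simp
      constructor
      · rw [List.foldl_cons, hstep, (ih temp).1, hT]
      · rw [List.foldl_cons, hstep, (ih temp).1, hF]
    · obtain ⟨w, ws, hsplit⟩ : ∃ w ws, List.splitOnP (· == ' ') cs = w :: ws := by
        cases h : List.splitOnP (· == ' ') cs with
        | nil => exact absurd h (splitOnP_space_ne_nil cs)
        | cons w ws => exact ⟨w, ws, rfl⟩
      have hsplitc : List.splitOnP (· == ' ') (c :: cs) = (c :: w) :: ws := by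
        rw [List.splitOnP_cons]
        simp [hsp, hsplit]
      constructor
      · have hstep : segAstep (temp, true) c = (temp ++ [c, ' '], false) := by
          simp [segAstep, hsp]
        rw [List.foldl_cons, hstep, (ih (temp ++ [c, ' '])).2]
        simp [segFlatT, segFlatF, hsplitc, hsplit, segPieces]
      · have hstep : segAstep (temp, false) c = (temp ++ segMid c, false) := by
          by_cases h : c = '\n' <;> simp [segAstep, hsp, h, segMid]
        rw [List.foldl_cons, hstep, (ih (temp ++ segMid c)).2]
        simp [segFlatF, hsplitc, hsplit]

-- the two pre-strip texts coincide
lemma seg_text_eq (cs : List Char) :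
    (cs.foldl segAstep ([], true)).1
      = PySem.Chars.join [] ((cs.splitOn ' ').foldl segBword []) := by
  rw [(segA_char cs []).1]
  have h1 : cs.splitOn ' ' = List.splitOnP (· == ' ') cs := rfl
  rw [h1, segB_outer, PySem.Chars.join, List.intercalate, flatten_intersperse_nil]
  simp [segFlatT]

-- ===== VERDICT (by name: the statement is the Claim_ definition above) =====
theorem segment_char_spec : Claim_equal_segment_char := by
  intro sent _
  unfold Spec_segment_char segment_char segment_char_alt
  rw [seg_text_eq sent.toList]
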